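-- pv_equiv track=rewrite | github.com/VRNyarc/nyarc-vrcat-tools | nyarc_vrcat_tools/mirror_flip/utils/naming.py | detect_naming_pattern
-- ===== SOURCE A (Python) =====
-- def detect_naming_pattern(name, axis='X'):
--     """Legacy function - returns simple pattern info"""
--     if not name:
--         return None, None, axis
--
--     name_lower = name.lower()
--
--     # Check for simple suffixes
--     suffix_patterns = {
--         'X': ['.l', '.r', '_l', '_r'],
--         'Y': ['.f', '.b', '_f', '_b'],
--         'Z': ['.u', '.d', '_u', '_d']
--     }
--
--     for check_axis, patterns in suffix_patterns.items():
--         for pattern in patterns: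
--             if name_lower.endswith(pattern):
--                 opposite_pattern = get_opposite_suffix(pattern)
--                 return pattern, opposite_pattern, check_axis
--
--     return None, None, axis
--
-- def get_opposite_suffix(suffix):
--     """Get opposite suffix"""
--     opposites = {
--         '.l': '.r', '.r': '.l',
--         '_l': '_r', '_r': '_l',
--         '.f': '.b', '.b': '.f',
--         '_f': '_b', '_b': '_f',
--         '.u': '.d', '.d': '.u',
--         '_u': '_d', '_d': '_u'
--     }
--     return opposites.get(suffix.lower(), suffix)
-- ===== SOURCE B (Python) =====
-- _SUFFIX_TABLE = {
--     '.l': ('.l', '.r', 'X'), '.r': ('.r', '.l', 'X'),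
--     '_l': ('_l', '_r', 'X'), '_r': ('_r', '_l', 'X'),
--     '.f': ('.f', '.b', 'Y'), '.b': ('.b', '.f', 'Y'),
--     '_f': ('_f', '_b', 'Y'), '_b': ('_b', '_f', 'Y'),
--     '.u': ('.u', '.d', 'Z'), '.d': ('.d', '.u', 'Z'),
--     '_u': ('_u', '_d', 'Z'), '_d': ('_d', '_u', 'Z'),
-- }
--
-- def detect_naming_pattern(name, axis='X'):
--     if not name:
--         return None, None, axis
--     return _SUFFIX_TABLE.get(name.lower()[-2:], (None, None, axis))
-- ===== Notes on version B (the rewrite author's own statement) =====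
-- stated objective: simpler
-- what changed: Replaces the nested loops over per-axis suffix lists plus the separate get_opposite_suffix helper with a single module-level table keyed by the last two lowered characters and one dict lookup with the (None, None, axis) default.
import Mathlib
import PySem

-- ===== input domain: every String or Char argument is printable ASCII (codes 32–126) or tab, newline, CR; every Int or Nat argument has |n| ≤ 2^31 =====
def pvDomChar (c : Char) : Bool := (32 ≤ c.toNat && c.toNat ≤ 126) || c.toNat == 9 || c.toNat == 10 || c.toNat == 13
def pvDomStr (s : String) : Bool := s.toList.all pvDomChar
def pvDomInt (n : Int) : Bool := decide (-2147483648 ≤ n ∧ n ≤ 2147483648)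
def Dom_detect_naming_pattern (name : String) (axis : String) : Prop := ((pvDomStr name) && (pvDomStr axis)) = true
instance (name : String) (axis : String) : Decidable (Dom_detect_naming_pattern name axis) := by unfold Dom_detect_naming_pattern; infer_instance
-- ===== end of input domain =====

-- B replaces A's nested per-axis suffix-list scans and the get_opposite_suffix helper by one table lookup keyed on the last two lowered characters (objective: simpler).
-- ===== PORT A =====
-- helper get_opposite_suffix: opposites.get(suffix.lower(), suffix)
def pv_opposites : PySem.Dict String String := PySem.Dict.ofList
  [(".l", ".r"), (".r", ".l"), ("_l", "_r"), ("_r", "_l"),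
   (".f", ".b"), (".b", ".f"), ("_f", "_b"), ("_b", "_f"),
   (".u", ".d"), (".d", ".u"), ("_u", "_d"), ("_d", "_u")]

def get_opposite_suffix (suffix : String) : String :=
  pv_opposites.getD (PySem.Str.lower suffix) suffix

def pv_suffix_patterns : List (String × List String) :=
  [("X", [".l", ".r", "_l", "_r"]),
   ("Y", [".f", ".b", "_f", "_b"]),
   ("Z", [".u", ".d", "_u", "_d"])]

-- inner 'for pattern in patterns' loop: first matching pattern wins
def pvInnerScan (name_lower : String) (check_axis : String) :
    List String → Option (Option String × Option String × String)
  | [] => none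
  | pattern :: rest =>
    if PySem.Str.endswith name_lower pattern then
      some (some pattern, some (get_opposite_suffix pattern), check_axis)
    else pvInnerScan name_lower check_axis rest

-- outer 'for check_axis, patterns in suffix_patterns.items()' loop
def pvOuterScan (name_lower : String) :
    List (String × List String) → Option (Option String × Option String × String)
  | [] => none
  | (check_axis, patterns) :: rest =>
    match pvInnerScan name_lower check_axis patterns with
    | some r => some r
    | none => pvOuterScan name_lower rest

def detect_naming_pattern (name : String) (axis : String) : Option String × Option String × String :=
  if name = "" then (none, none, axis)
  else
    match pvOuterScan (PySem.Str.lower name) pv_suffix_patterns with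
    | some r => r
    | none => (none, none, axis)

-- ===== PORT B =====
def pvSuffixTable : PySem.Dict String (Option String × Option String × String) := PySem.Dict.ofList
  [(".l", (some ".l", some ".r", "X")), (".r", (some ".r", some ".l", "X")),
   ("_l", (some "_l", some "_r", "X")), ("_r", (some "_r", some "_l", "X")),
   (".f", (some ".f", some ".b", "Y")), (".b", (some ".b", some ".f", "Y")),
   ("_f", (some "_f", some "_b", "Y")), ("_b", (some "_b", some "_f", "Y")),
   (".u", (some ".u", some ".d", "Z")), (".d", (some ".d", some ".u", "Z")),
   ("_u", (some "_u", some "_d", "Z")), ("_d", (some "_d", some "_u", "Z"))]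

def detect_naming_pattern_alt (name : String) (axis : String) : Option String × Option String × String :=
  if name = "" then (none, none, axis)
  else pvSuffixTable.getD (PySem.Str.slice (PySem.Str.lower name) (some (-2)) none) (none, none, axis)

-- ===== PRECONDITION & SPEC =====
def Spec_detect_naming_pattern (name : String) (axis : String) (out : Option String × Option String × String) : Prop := out = detect_naming_pattern_alt name axis
instance (name : String) (axis : String) (out : Option String × Option String × String) : Decidable (Spec_detect_naming_pattern name axis out) := by unfold Spec_detect_naming_pattern; infer_instance

-- ===== CLAIM (what is proved, stated in full; the proofs are below) =====
def Claim_equal_detect_naming_pattern : Prop := ∀ (name : String) (axis : String), Dom_detect_naming_pattern name axis → Spec_detect_naming_pattern name axis (detect_naming_pattern name axis)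

-- ===== LEMMAS AND PROOFS =====

-- endswith by a 2-char pattern is equality of the last-two-char slice with the pattern
lemma endswith_eq_key (nl p : String) (hp : p.toList.length = 2) :
    PySem.Str.endswith nl p = (PySem.Str.slice nl (some (-2)) none == p) := by
  have hsl : (PySem.Str.slice nl (some (-2)) none).toList = nl.toList.drop (nl.toList.length - 2) := by
    rw [PySem.Str.toList_slice, PySem.Chars.slice_eq_listSlice,
        PySem.List.slice_from_neg_ofNat nl.toList 2 (by omega)]
  rw [Bool.eq_iff_iff]
  constructor
  · intro h
    have hsuf : p.toList <:+ nl.toList := (PySem.Chars.endswith_iff _ _).mp (by simpa using h)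
    have := (List.suffix_iff_eq_drop).mp hsuf
    rw [hp] at this
    have : (PySem.Str.slice nl (some (-2)) none).toList = p.toList := by rw [hsl, this]
    simpa [beq_iff_eq] using (String.toList_inj.mp this).symm.symm
  · intro h
    have heq : PySem.Str.slice nl (some (-2)) none = p := by simpa [beq_iff_eq] using h
    have htl : p.toList = nl.toList.drop (nl.toList.length - 2) := by rw [← heq, hsl]
    have hsuf : p.toList <:+ nl.toList := by
      rw [List.suffix_iff_eq_drop, hp]; exact htl
    simpa using (PySem.Chars.endswith_iff _ _).mpr hsuf

lemma scan_eq_lookup (nl : String) (axis : String) :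
    (match pvOuterScan nl pv_suffix_patterns with
     | some r => r
     | none => (none, none, axis)) =
    pvSuffixTable.getD (PySem.Str.slice nl (some (-2)) none) (none, none, axis) := by
  simp only [pv_suffix_patterns, pvOuterScan, pvInnerScan,
    endswith_eq_key nl ".l" (by decide), endswith_eq_key nl ".r" (by decide),
    endswith_eq_key nl "_l" (by decide), endswith_eq_key nl "_r" (by decide),
    endswith_eq_key nl ".f" (by decide), endswith_eq_key nl ".b" (by decide),
    endswith_eq_key nl "_f" (by decide), endswith_eq_key nl "_b" (by decide),
    endswith_eq_key nl ".u" (by decide), endswith_eq_key nl ".d" (by decide),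
    endswith_eq_key nl "_u" (by decide), endswith_eq_key nl "_d" (by decide)]
  set k := PySem.Str.slice nl (some (-2)) none with hk
  clear_value k
  by_cases h1 : k = ".l"; · subst h1; rfl
  by_cases h2 : k = ".r"; · subst h2; rfl
  by_cases h3 : k = "_l"; · subst h3; rfl
  by_cases h4 : k = "_r"; · subst h4; rfl
  by_cases h5 : k = ".f"; · subst h5; rfl
  by_cases h6 : k = ".b"; · subst h6; rfl
  by_cases h7 : k = "_f"; · subst h7; rfl
  by_cases h8 : k = "_b"; · subst h8; rfl
  by_cases h9 : k = ".u"; · subst h9; rfl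
  by_cases h10 : k = ".d"; · subst h10; rfl
  by_cases h11 : k = "_u"; · subst h11; rfl
  by_cases h12 : k = "_d"; · subst h12; rfl
  have hmk : pvSuffixTable = PySem.Dict.mk
      [(".l", (some ".l", some ".r", "X")), (".r", (some ".r", some ".l", "X")),
       ("_l", (some "_l", some "_r", "X")), ("_r", (some "_r", some "_l", "X")),
       (".f", (some ".f", some ".b", "Y")), (".b", (some ".b", some ".f", "Y")),
       ("_f", (some "_f", some "_b", "Y")), ("_b", (some "_b", some "_f", "Y")),
       (".u", (some ".u", some ".d", "Z")), (".d", (some ".d", some ".u", "Z")),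
       ("_u", (some "_u", some "_d", "Z")), ("_d", (some "_d", some "_u", "Z"))] := by rfl
  rw [hmk]
  simp [PySem.Dict.getD, PySem.Dict.get?_mk_cons, PySem.Dict.get?,
    h1, h2, h3, h4, h5, h6, h7, h8, h9, h10, h11, h12,
    Ne.symm h1, Ne.symm h2, Ne.symm h3, Ne.symm h4, Ne.symm h5, Ne.symm h6,
    Ne.symm h7, Ne.symm h8, Ne.symm h9, Ne.symm h10, Ne.symm h11, Ne.symm h12]

-- ===== VERDICT (by name: the statement is the Claim_ definition above) =====
theorem detect_naming_pattern_spec : Claim_equal_detect_naming_pattern := by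
  intro name axis _
  unfold Spec_detect_naming_pattern detect_naming_pattern detect_naming_pattern_alt
  by_cases h : name = ""
  · simp [h]
  · simp only [h, if_neg h, if_false]
    exact scan_eq_lookup (PySem.Str.lower name) axis
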